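-- pv_equiv track=rewrite | github.com/Surya-T-S/netui | netui/widgets/wifi_panel.py | _is_nonfatal_wifi_state
-- ===== SOURCE A (Python) =====
-- def _is_nonfatal_wifi_state(error: str) -> bool:
--     text = error.lower()
--     return any(
--         token in text
--         for token in (
--             "not connected",
--             "no wi-fi interface",
--             "neither iw nor iwconfig",
--             "not available",
--         )
--     )
-- ===== SOURCE B (Python) =====
-- def _is_nonfatal_wifi_state(error: str) -> bool:
--     tokens = (
--         "not connected",
--         "no wi-fi interface",
--         "neither iw nor iwconfig",
--         "not available",
--     )
--     text = error.lower()
--     i = 0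
--     while i < len(text):
--         for tok in tokens:
--             if text.startswith(tok, i):
--                 return True
--         i += 1
--     return False
-- ===== Notes on version B (the rewrite author's own statement) =====
-- stated objective: alternative
-- what changed: Replaces four independent whole-text substring searches with one left-to-right scan that at each position checks whether any of the tokens starts there, so the text is traversed once.
import Mathlib
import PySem

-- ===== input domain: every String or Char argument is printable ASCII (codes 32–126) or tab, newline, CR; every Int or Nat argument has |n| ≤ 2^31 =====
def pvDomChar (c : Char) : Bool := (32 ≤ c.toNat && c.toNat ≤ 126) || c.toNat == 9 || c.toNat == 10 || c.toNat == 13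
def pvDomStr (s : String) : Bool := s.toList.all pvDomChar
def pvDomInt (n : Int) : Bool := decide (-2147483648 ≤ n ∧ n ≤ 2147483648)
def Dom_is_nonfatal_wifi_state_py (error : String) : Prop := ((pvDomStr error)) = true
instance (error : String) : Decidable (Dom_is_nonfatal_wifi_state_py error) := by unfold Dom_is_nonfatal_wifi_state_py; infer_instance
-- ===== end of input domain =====

-- B replaces four independent substring searches by one left-to-right scan that at each
-- position checks whether any token starts there (alternative decomposition, same cost class).


-- ===== PORT A =====
-- text = error.lower(); any(token in text for token in (...))
def is_nonfatal_wifi_state_py (error : String) : Bool :=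
  let text := PySem.Str.lower error
  [ "not connected",
    "no wi-fi interface",
    "neither iw nor iwconfig",
    "not available" ].any (fun token => PySem.Str.isIn token text)

-- ===== PORT B =====
-- the token tuple, as lists of characters
def pvTokens : List (List Char) :=
  [ "not connected".toList,
    "no wi-fi interface".toList,
    "neither iw nor iwconfig".toList,
    "not available".toList ]

-- the while-loop of B: advance one position at a time (text.startswith(tok, i) = tok prefix of the drop)
def pvScan (cs : List Char) : Bool :=
  match cs with
  | [] => false
  | _ :: rest =>
      if pvTokens.any (fun tok => PySem.Chars.startswith cs tok) then true
      else pvScan rest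

def is_nonfatal_wifi_state_py_alt (error : String) : Bool :=
  pvScan (PySem.Chars.lower error.toList)

-- ===== PRECONDITION & SPEC =====
def Spec_is_nonfatal_wifi_state_py (error : String) (out : Bool) : Prop := out = is_nonfatal_wifi_state_py_alt error
instance (error : String) (out : Bool) : Decidable (Spec_is_nonfatal_wifi_state_py error out) := by unfold Spec_is_nonfatal_wifi_state_py; infer_instance

-- ===== CLAIM (what is proved, stated in full; the proofs are below) =====
def Claim_equal_is_nonfatal_wifi_state_py : Prop := ∀ (error : String), Dom_is_nonfatal_wifi_state_py error → Spec_is_nonfatal_wifi_state_py error (is_nonfatal_wifi_state_py error)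

-- ===== LEMMAS AND PROOFS =====
theorem pvScan_iff (cs : List Char) :
    pvScan cs = true ↔ ∃ tok ∈ pvTokens, tok <:+: cs := by
  induction cs with
  | nil => simp only [pvScan]; decide
  | cons c rest ih =>
      rw [pvScan]
      split_ifs with h
      · simp only [List.any_eq_true, PySem.Chars.startswith_iff] at h
        obtain ⟨tok, hmem, hp⟩ := h
        simp only [true_iff]
        exact ⟨tok, hmem, hp.isInfix⟩
      · simp only [List.any_eq_true, PySem.Chars.startswith_iff, not_exists, not_and] at h
        rw [ih]
        constructor
        · rintro ⟨tok, hmem, hi⟩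
          exact ⟨tok, hmem, hi.trans (List.suffix_cons c rest).isInfix⟩
        · rintro ⟨tok, hmem, hi⟩
          rcases List.infix_cons_iff.mp hi with hp | hi'
          · exact absurd hp (h tok hmem)
          · exact ⟨tok, hmem, hi'⟩

-- ===== VERDICT (by name: the statement is the Claim_ definition above) =====
theorem is_nonfatal_wifi_state_py_spec : Claim_equal_is_nonfatal_wifi_state_py := by
  intro error _
  unfold Spec_is_nonfatal_wifi_state_py is_nonfatal_wifi_state_py is_nonfatal_wifi_state_py_alt
  rw [Bool.eq_iff_iff, pvScan_iff]
  simp [pvTokens, PySem.Chars.isIn_iff_infix, ← PySem.Str.toList_lower]
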